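-- pv_equiv track=rewrite | github.com/Discovery-Collision-Theory-DCT/Discovery-Collision-Theory-DCT-Local-Lab | dct/utils.py | _append_missing_json_closers
-- ===== SOURCE A (Python) =====
-- def _append_missing_json_closers(text: str) -> str:
--     stack: list[str] = []
--     in_string = False
--     escaped = False
--
--     for ch in text:
--         if in_string:
--             if escaped:
--                 escaped = False
--             elif ch == "\\":
--                 escaped = True
--             elif ch == "\"":
--                 in_string = False
--             continue
--
--         if ch == "\"":
--             in_string = True
--         elif ch == "{":
--             stack.append("}")
--         elif ch == "[":
--             stack.append("]")
--         elif ch in {"}", "]"} and stack and ch == stack[-1]: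
--             stack.pop()
--
--     out = text
--     if in_string:
--         if out.endswith("\\"):
--             out = out[:-1]
--         out += "\""
--     if stack:
--         out += "".join(reversed(stack))
--     return out
-- ===== SOURCE B (Python) =====
-- def _append_missing_json_closers(text: str) -> str:
--     stack = []
--     open_string = False
--     i = 0
--     n = len(text)
--     while i < n:
--         ch = text[i]
--         if ch == '"':
--             # enter string: skip to the closing unescaped quote (or run off the end)
--             i += 1
--             closed = False
--             while i < n:
--                 c = text[i]
--                 if c == '\\':
--                     i += 2
--                 elif c == '"':
--                     closed = True
--                     i += 1
--                     break
--                 else: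
--                     i += 1
--             open_string = not closed
--         else:
--             if ch == '{':
--                 stack.append('}')
--             elif ch == '[':
--                 stack.append(']')
--             elif ch in {'}', ']'} and stack and ch == stack[-1]:
--                 stack.pop()
--             i += 1
--     out = text
--     if open_string:
--         if out.endswith('\\'):
--             out = out[:-1]
--         out += '"'
--     return out + ''.join(reversed(stack))
-- ===== Notes on version B (the rewrite author's own statement) =====
-- stated objective: alternative
-- what changed: Replaced the single character-fold state machine carrying (stack, in_string, escaped) flags with an index/cursor scan that handles each string literal in a dedicated inner skipping loop (jumping two positions past escapes), so the top-level loop only ever sees structural characters and no boolean mode flags are threaded.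
import Mathlib
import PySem

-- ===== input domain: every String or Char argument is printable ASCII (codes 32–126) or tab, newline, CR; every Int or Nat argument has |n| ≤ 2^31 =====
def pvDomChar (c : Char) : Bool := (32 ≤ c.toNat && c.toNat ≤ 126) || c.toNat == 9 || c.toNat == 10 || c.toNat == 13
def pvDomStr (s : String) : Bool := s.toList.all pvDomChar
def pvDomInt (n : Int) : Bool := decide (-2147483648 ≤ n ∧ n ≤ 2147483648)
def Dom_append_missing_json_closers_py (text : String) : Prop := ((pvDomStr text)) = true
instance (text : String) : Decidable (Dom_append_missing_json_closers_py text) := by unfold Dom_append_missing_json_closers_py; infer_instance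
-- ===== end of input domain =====

-- B replaces A's flag-threading state machine by a cursor scan with an inner string-skipping loop (alternative decomposition, same cost).


-- ===== PORT A =====
-- A's loop over the characters, threading (stack, in_string, escaped); stack head = Python stack top.
def pvAfold : List Char → List Char → Bool → Bool → (List Char × Bool × Bool)
  | [], stack, ins, esc => (stack, ins, esc)
  | ch :: rest, stack, ins, esc =>
    if ins then
      if esc then pvAfold rest stack ins false
      else if ch = '\\' then pvAfold rest stack ins true
      else if ch = '"' then pvAfold rest stack false esc
      else pvAfold rest stack ins esc
    else
      if ch = '"' then pvAfold rest stack true esc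
      else if ch = '{' then pvAfold rest ('}' :: stack) ins esc
      else if ch = '[' then pvAfold rest (']' :: stack) ins esc
      else
        match stack with
        | top :: tl =>
          if (ch = '}' ∨ ch = ']') ∧ ch = top then pvAfold rest tl ins esc
          else pvAfold rest stack ins esc
        | [] => pvAfold rest stack ins esc

def append_missing_json_closers_py (text : String) : String :=
  let r := pvAfold text.toList [] false false
  let stack := r.1
  let ins := r.2.1
  let out := text.toList
  let out := if ins then (if out.getLast? = some '\\' then out.dropLast else out) ++ ['"'] else out
  String.ofList (out ++ stack)

-- ===== PORT B =====
-- B's inner loop: skip a string body, jumping past the char after a backslash; returns (rest, closed?).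
def pvSkipString : List Char → (List Char × Bool)
  | [] => ([], false)
  | c :: rest =>
    if c = '\\' then
      match rest with
      | [] => ([], false)
      | _ :: r2 => pvSkipString r2
    else if c = '"' then (rest, true)
    else pvSkipString rest

theorem pvSkipString_len : ∀ l : List Char, (pvSkipString l).1.length ≤ l.length := by
  intro l
  induction l using pvSkipString.induct with
  | case1 => exact Nat.le_refl _
  | case2 => exact Nat.zero_le _
  | case3 head r2 ih =>
      have e : pvSkipString ('\\' :: head :: r2) = pvSkipString r2 := rfl
      rw [e]; simp; omega
  | case4 r2 h =>
      have e : pvSkipString ('"' :: r2) = (r2, true) := by rw [pvSkipString.eq_def]; rfl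
      rw [e]; simp
  | case5 head r2 h h2 ih =>
      have e : pvSkipString (head :: r2) = pvSkipString r2 := by
        rw [pvSkipString.eq_def]; simp [h, h2]
      rw [e]; simp; omega
-- B's top-level cursor scan: only structural chars are examined; strings go through pvSkipString.
def pvBscan : List Char → List Char → Bool → (List Char × Bool)
  | [], stack, os => (stack, os)
  | ch :: rest, stack, os =>
    if ch = '"' then
      let r := pvSkipString rest
      pvBscan r.1 stack (!r.2)
    else if ch = '{' then pvBscan rest ('}' :: stack) os
    else if ch = '[' then pvBscan rest (']' :: stack) os
    else if ch = '}' ∨ ch = ']' then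
      match stack with
      | top :: tl => if ch = top then pvBscan rest tl os else pvBscan rest stack os
      | [] => pvBscan rest stack os
    else pvBscan rest stack os
termination_by l _ _ => l.length
decreasing_by
  · have := pvSkipString_len rest; simp_all
  all_goals simp_all

def append_missing_json_closers_py_alt (text : String) : String :=
  let r := pvBscan text.toList [] false
  let stack := r.1
  let open_string := r.2
  let out := text.toList
  let out := if open_string then (if out.getLast? = some '\\' then out.dropLast else out) ++ ['"'] else out
  String.ofList (out ++ stack)

-- ===== PRECONDITION & SPEC =====
def Spec_append_missing_json_closers_py (text : String) (out : String) : Prop := out = append_missing_json_closers_py_alt text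
instance (text : String) (out : String) : Decidable (Spec_append_missing_json_closers_py text out) := by unfold Spec_append_missing_json_closers_py; infer_instance

-- ===== CLAIM (what is proved, stated in full; the proofs are below) =====
def Claim_equal_append_missing_json_closers_py : Prop := ∀ (text : String), Dom_append_missing_json_closers_py text → Spec_append_missing_json_closers_py text (append_missing_json_closers_py text)

-- ===== LEMMAS AND PROOFS =====

-- One-step equations (by rfl / definitional unfolding) used throughout the proofs.
theorem skip_nil : pvSkipString [] = ([], false) := rfl
theorem skip_bs1 : pvSkipString ['\\'] = ([], false) := rfl
theorem skip_bs (x : Char) (r2 : List Char) : pvSkipString ('\\' :: x :: r2) = pvSkipString r2 := rfl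
theorem skip_q (r2 : List Char) : pvSkipString ('"' :: r2) = (r2, true) := by
  rw [pvSkipString.eq_def]; rfl
theorem skip_other (c : Char) (r2 : List Char) (h : ¬c = '\\') (h2 : ¬c = '"') :
    pvSkipString (c :: r2) = pvSkipString r2 := by
  rw [pvSkipString.eq_def]; simp [h, h2]

theorem afold_str_nil (stack : List Char) (esc : Bool) : pvAfold [] stack true esc = (stack, true, esc) := rfl
theorem afold_str_bs1 (stack : List Char) : pvAfold ['\\'] stack true false = (stack, true, true) := rfl
theorem afold_str_bs (x : Char) (r2 stack : List Char) :
    pvAfold ('\\' :: x :: r2) stack true false = pvAfold r2 stack true false := rfl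
theorem afold_str_q (r2 stack : List Char) :
    pvAfold ('"' :: r2) stack true false = pvAfold r2 stack false false := rfl
theorem afold_str_other (c : Char) (r2 stack : List Char) (h : ¬c = '\\') (h2 : ¬c = '"') :
    pvAfold (c :: r2) stack true false = pvAfold r2 stack true false := by
  rw [pvAfold.eq_def]; simp [h, h2]

theorem afold_q (rest stack : List Char) :
    pvAfold ('"' :: rest) stack false false = pvAfold rest stack true false := by
  rw [pvAfold.eq_def]; rfl
theorem afold_lb (rest stack : List Char) :
    pvAfold ('{' :: rest) stack false false = pvAfold rest ('}' :: stack) false false := by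
  rw [pvAfold.eq_def]; rfl
theorem afold_lk (rest stack : List Char) :
    pvAfold ('[' :: rest) stack false false = pvAfold rest (']' :: stack) false false := by
  rw [pvAfold.eq_def]; rfl

theorem bscan_nil (stack : List Char) (os : Bool) : pvBscan [] stack os = (stack, os) := by
  rw [pvBscan.eq_def]
theorem bscan_q (rest stack : List Char) (os : Bool) :
    pvBscan ('"' :: rest) stack os = pvBscan (pvSkipString rest).1 stack (!(pvSkipString rest).2) := by
  rw [pvBscan.eq_def]; rfl
theorem bscan_lb (rest stack : List Char) (os : Bool) :
    pvBscan ('{' :: rest) stack os = pvBscan rest ('}' :: stack) os := by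
  rw [pvBscan.eq_def]; rfl
theorem bscan_lk (rest stack : List Char) (os : Bool) :
    pvBscan ('[' :: rest) stack os = pvBscan rest (']' :: stack) os := by
  rw [pvBscan.eq_def]; rfl

-- An unterminated string consumes the whole rest of the input.
theorem pvSkip_unterminated : ∀ l : List Char, (pvSkipString l).2 = false → (pvSkipString l).1 = [] := by
  intro l
  induction l using pvSkipString.induct with
  | case1 => intro _; rfl
  | case2 => intro _; rfl
  | case3 head r2 ih => rw [skip_bs]; exact ih
  | case4 r2 h => rw [skip_q]; intro hc; exact absurd hc (by simp)
  | case5 head r2 h h2 ih => rw [skip_other head r2 h h2]; exact ih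

-- Inside a string, A's flag machine reaches the same point as B's skip loop.
theorem pvA_skip : ∀ (l stack : List Char),
    ((pvAfold l stack true false).1, (pvAfold l stack true false).2.1) =
    (if (pvSkipString l).2 then
      ((pvAfold (pvSkipString l).1 stack false false).1, (pvAfold (pvSkipString l).1 stack false false).2.1)
     else (stack, true)) := by
  intro l
  induction l using pvSkipString.induct with
  | case1 => intro stack; rw [skip_nil]; simp [afold_str_nil]
  | case2 => intro stack; rw [skip_bs1]; simp [afold_str_bs1]
  | case3 head r2 ih => intro stack; rw [skip_bs, afold_str_bs]; exact ih stack
  | case4 r2 h => intro stack; rw [skip_q, afold_str_q]; simp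
  | case5 head r2 h h2 ih =>
      intro stack
      rw [skip_other head r2 h h2, afold_str_other head r2 stack h h2]
      exact ih stack

theorem pvAB_aux : ∀ (n : Nat) (l stack : List Char), l.length ≤ n →
    ((pvAfold l stack false false).1, (pvAfold l stack false false).2.1) = pvBscan l stack false := by
  intro n
  induction n with
  | zero =>
      intro l stack hl
      have : l = [] := List.eq_nil_of_length_eq_zero (Nat.le_zero.mp hl)
      subst this; rw [bscan_nil]; rfl
  | succ n ih =>
      intro l stack hl
      match l with
      | [] => rw [bscan_nil]; rfl
      | ch :: rest =>
        have hr : rest.length ≤ n := by simpa using hl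
        by_cases hq : ch = '"'
        · subst hq
          have hs := pvA_skip rest stack
          rw [afold_q, bscan_q]
          by_cases hc : (pvSkipString rest).2 = true
          · have hlen : (pvSkipString rest).1.length ≤ n :=
              le_trans (pvSkipString_len rest) hr
            rw [hs, if_pos hc, hc]
            exact ih _ stack hlen
          · have hc' : (pvSkipString rest).2 = false := by simpa using hc
            have hnil := pvSkip_unterminated rest hc'
            rw [hs, if_neg hc, hnil, hc', bscan_nil]
            rfl
        · by_cases h1 : ch = '{'
          · subst h1
            rw [afold_lb, bscan_lb]
            exact ih rest _ hr
          · by_cases h2 : ch = '['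
            · subst h2
              rw [afold_lk, bscan_lk]
              exact ih rest _ hr
            · rw [pvAfold.eq_def, pvBscan.eq_def]
              cases stack with
              | nil =>
                  simp [hq, h1, h2]
                  exact ih rest [] hr
              | cons top tl =>
                  simp [hq, h1, h2]
                  by_cases h3 : ch = '}' ∨ ch = ']'
                  · by_cases h4 : ch = top
                    · rw [if_pos ⟨h3, h4⟩, if_pos h3, if_pos h4]
                      exact ih rest tl hr
                    · rw [if_neg (fun hco => h4 hco.2), if_pos h3, if_neg h4]
                      exact ih rest (top :: tl) hr
                  · rw [if_neg (fun hco => h3 hco.1), if_neg h3]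
                    exact ih rest (top :: tl) hr

theorem pvAB (l stack : List Char) :
    ((pvAfold l stack false false).1, (pvAfold l stack false false).2.1) = pvBscan l stack false :=
  pvAB_aux l.length l stack le_rfl

-- ===== VERDICT (by name: the statement is the Claim_ definition above) =====
theorem append_missing_json_closers_py_spec : Claim_equal_append_missing_json_closers_py := by
  intro text _
  have h := pvAB text.toList []
  have h1 : (pvAfold text.toList [] false false).1 = (pvBscan text.toList [] false).1 := by
    rw [← h]
  have h2 : (pvAfold text.toList [] false false).2.1 = (pvBscan text.toList [] false).2 := by
    rw [← h]
  simp only [Spec_append_missing_json_closers_py, append_missing_json_closers_py,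
    append_missing_json_closers_py_alt, h1, h2]
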